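-- pv_equiv track=rewrite | github.com/miliar/Code_Jam_Webscraper | solutions_python/solutions_year17_round4_nr2/45.py | solve
-- ===== SOURCE A (Python) =====
-- def solve(tc, tp):
-- 	rc = max(len(l) for l in tc)
-- 	lenp = [len(l) for l in tp]
-- 	sump = [len(l) for l in tp]
-- 	for i in range(1,len(sump)):
-- 		sump[i] += sump[i-1]
-- 	rp = max(x//(i+1) + (x%(i+1)!=0) for i, x in enumerate(sump))
-- 	r = max(rc, rp)
-- 	s = 0
-- 	f = 0
-- 	for p, x in enumerate(lenp):
-- 		if x<=r:
-- 			f += r-x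
-- 		else:
-- 			k = x-r
-- 			s += k
-- 			f -= k
-- 	return r, s
-- ===== SOURCE B (Python) =====
-- def feasible(lens, r):
--     # can every prefix of i recipes be covered with r servings each?
--     tot = 0
--     for i, x in enumerate(lens, 1):
--         tot += x
--         if tot > r * i:
--             return False
--     return True
--
--
-- def solve(tc, tp):
--     rc = max(len(l) for l in tc)
--     lens = [len(l) for l in tp]
--     # binary search the least r >= rc that is feasible for every prefix
--     lo, hi = rc, rc + sum(lens)
--     while lo < hi:
--         mid = (lo + hi) // 2
--         if feasible(lens, mid):
--             hi = mid
--         else: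
--             lo = mid + 1
--     r = lo
--     s = sum(x - r for x in lens if x > r)
--     return r, s
-- ===== Notes on version B (the rewrite author's own statement) =====
-- stated objective: alternative
-- what changed: Instead of computing the maximum of the ceiling averages over an explicit prefix-sum array (A's three passes plus dead 'f' bookkeeping), B binary-searches the least servings count r at or above the longest-class length for which a feasibility predicate (every prefix sum fits within r per recipe) holds, then sums the excesses over r.
-- crash fix: On nonempty tc with tp == [], A raises ValueError (max() over an empty generator); B's binary search degenerates and it returns (rc, 0). — e.g. on solve([[1]], []): A raises ValueError, B returns (1, 0)
import Mathlib
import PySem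

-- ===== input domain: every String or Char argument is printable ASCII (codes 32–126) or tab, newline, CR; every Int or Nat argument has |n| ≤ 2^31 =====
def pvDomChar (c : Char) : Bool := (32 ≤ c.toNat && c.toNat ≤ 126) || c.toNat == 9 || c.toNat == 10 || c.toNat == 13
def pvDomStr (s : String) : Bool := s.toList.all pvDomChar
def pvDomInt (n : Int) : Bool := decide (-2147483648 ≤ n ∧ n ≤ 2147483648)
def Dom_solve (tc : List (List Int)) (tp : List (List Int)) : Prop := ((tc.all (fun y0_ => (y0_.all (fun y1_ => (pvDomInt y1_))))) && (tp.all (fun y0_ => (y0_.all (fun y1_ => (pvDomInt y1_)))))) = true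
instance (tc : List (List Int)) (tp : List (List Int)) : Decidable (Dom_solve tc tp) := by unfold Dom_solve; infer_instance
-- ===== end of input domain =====

-- B replaces A's direct max-of-prefix-average-ceilings computation (prefix-sum array, enumerate
-- pass, dead (s,f) loop) by a binary search for the least feasible servings count; objective: alternative.

-- ===== PORT A =====
def solve (tc : List (List Int)) (tp : List (List Int)) : Int × Int :=
  let rc : Int := (PySem.List.max? (tc.map (fun l => (l.length : Int))) (fun x => x)).getD 0
  let lenp : List Int := tp.map (fun l => (l.length : Int))
  let sump0 : List Int := tp.map (fun l => (l.length : Int))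
  let sump : List Int := (PySem.List.pyRange 1 (sump0.length : Int) 1).foldl
      (fun a i => PySem.List.pySetD a i (PySem.List.pyGetD a i 0 + PySem.List.pyGetD a (i-1) 0)) sump0
  let rp : Int := (PySem.List.max? ((PySem.List.enumerate sump 0).map
      (fun ix => PySem.Int.floordiv ix.2 (ix.1+1) + (if PySem.Int.mod ix.2 (ix.1+1) ≠ 0 then 1 else 0))) (fun x => x)).getD 0
  let r : Int := max rc rp
  let sf : Int × Int := lenp.foldl (fun (sf : Int × Int) x =>
      if x ≤ r then (sf.1, sf.2 + (r - x))
      else (sf.1 + (x - r), sf.2 - (x - r))) (0, 0)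
  (r, sf.1)

-- ===== PORT B =====
-- Source B's feasible(lens, r): streaming prefix check with early exit
def pvFeas : List Int → Int → Int → Int → Bool
  | [], _, _, _ => true
  | x :: t, r, tot, i => if tot + x > r * i then false else pvFeas t r (tot + x) (i + 1)

-- Source B's while-loop binary search; the fuel (hi-lo).toNat bounds the iteration count exactly
def pvBS (lens : List Int) : Nat → Int → Int → Int
  | 0, lo, _ => lo
  | fuel + 1, lo, hi =>
    if lo < hi then
      let mid := PySem.Int.floordiv (lo + hi) 2
      if pvFeas lens mid 0 1 then pvBS lens fuel lo mid else pvBS lens fuel (mid + 1) hi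
    else lo

def solve_alt (tc : List (List Int)) (tp : List (List Int)) : Int × Int :=
  let rc : Int := (PySem.List.max? (tc.map (fun l => (l.length : Int))) (fun x => x)).getD 0
  let lens : List Int := tp.map (fun l => (l.length : Int))
  let lo : Int := rc
  let hi : Int := rc + lens.sum
  let r : Int := pvBS lens (hi - lo).toNat lo hi
  let s : Int := lens.foldl (fun acc x => if x > r then acc + (x - r) else acc) 0
  (r, s)

-- ===== PRECONDITION & SPEC =====
-- Pre_ excludes empty tc and empty tp, on which A's max() over an empty sequence raises ValueError.
def Pre_solve (tc : List (List Int)) (tp : List (List Int)) : Prop := tc ≠ [] ∧ tp ≠ []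
instance (tc : List (List Int)) (tp : List (List Int)) : Decidable (Pre_solve tc tp) := by unfold Pre_solve; infer_instance
def pvWitness_solve : List (List Int) × List (List Int) := ([[1]], [[1]])

-- On nonempty tc with tp = [], A raises ValueError (max over the empty ceilings sequence); B returns (rc, 0).
def Raises_solve (tc : List (List Int)) (tp : List (List Int)) : Prop := tc ≠ [] ∧ tp = []
instance (tc : List (List Int)) (tp : List (List Int)) : Decidable (Raises_solve tc tp) := by unfold Raises_solve; infer_instance
def pvRaiseWitness_solve : List (List Int) × List (List Int) := ([[1]], [])
def pvRaiseWitnessOut_solve : Int × Int := (1, 0)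

def Spec_solve (tc : List (List Int)) (tp : List (List Int)) (out : Int × Int) : Prop := out = solve_alt tc tp
instance (tc : List (List Int)) (tp : List (List Int)) (out : Int × Int) : Decidable (Spec_solve tc tp out) := by unfold Spec_solve; infer_instance

-- ===== CLAIM (what is proved, stated in full; the proofs are below) =====
def Claim_equal_solve : Prop := ∀ (tc : List (List Int)) (tp : List (List Int)), Dom_solve tc tp → Pre_solve tc tp → Spec_solve tc tp (solve tc tp)
def Claim_raises_solve : Prop := (∀ (tc : List (List Int)) (tp : List (List Int)), Dom_solve tc tp → Raises_solve tc tp → ¬ Pre_solve tc tp) ∧ (Dom_solve (pvRaiseWitness_solve.1) (pvRaiseWitness_solve.2) ∧ Raises_solve (pvRaiseWitness_solve.1) (pvRaiseWitness_solve.2) ∧ solve_alt (pvRaiseWitness_solve.1) (pvRaiseWitness_solve.2) = pvRaiseWitnessOut_solve)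

-- ===== LEMMAS AND PROOFS =====

-- prefix sums of xs with carry c
def pvRuns : Int → List Int → List Int
  | _, [] => []
  | c, x :: t => (c + x) :: pvRuns (c + x) t

theorem pvRuns_length (c : Int) (xs : List Int) : (pvRuns c xs).length = xs.length := by
  induction xs generalizing c with
  | nil => rfl
  | cons x t ih => simp [pvRuns, ih]

theorem pvRuns_snoc (c : Int) (xs : List Int) (y : Int) :
    pvRuns c (xs ++ [y]) = pvRuns c xs ++ [c + xs.sum + y] := by
  induction xs generalizing c with
  | nil => simp [pvRuns]
  | cons x t ih => simp [pvRuns, ih]; ring_nf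

theorem pvRuns_getD_last (c : Int) (xs : List Int) (h : xs ≠ []) :
    (pvRuns c xs).getD (xs.length - 1) 0 = c + xs.sum := by
  induction xs generalizing c with
  | nil => simp at h
  | cons x t ih =>
    cases t with
    | nil => simp [pvRuns]
    | cons y u =>
      have h2 := ih (c := c + x) (by simp)
      simp only [pvRuns, List.length_cons, List.sum_cons, Nat.add_sub_cancel,
        List.getD_cons_succ] at h2 ⊢
      omega

theorem pvGetD_append_self (L D : List Int) (d : Int) :
    (L ++ D).getD L.length d = D.getD 0 d := by
  induction L with
  | nil => rfl
  | cons a L ih => simpa using ih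

theorem pvGetD_append_left (L D : List Int) (k : Nat) (hk : k < L.length) (d : Int) :
    (L ++ D).getD k d = L.getD k d := by
  induction L generalizing k with
  | nil => simp at hk
  | cons a L ih =>
    cases k with
    | zero => rfl
    | succ k => simpa using ih k (by simpa using hk)

theorem pvSet_append_self (L D : List Int) (v : Int) :
    (L ++ D).set L.length v = L ++ D.set 0 v := by
  induction L with
  | nil => rfl
  | cons a L ih => simpa using ih

-- A's in-place prefix-sum loop computes pvRuns 0
theorem pvMutFold (xs : List Int) (n : Nat) (hn : n ≤ xs.length) :
    (PySem.List.pyRange 1 (n : Int) 1).foldl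
      (fun a i => PySem.List.pySetD a i (PySem.List.pyGetD a i 0 + PySem.List.pyGetD a (i-1) 0)) xs
    = pvRuns 0 (xs.take n) ++ xs.drop n := by
  induction n with
  | zero => simp [PySem.List.pyRange_one_eq_nil (by omega : (0:Int) ≤ 1), pvRuns]
  | succ n ih =>
    by_cases h0 : n = 0
    · subst h0
      rw [show (((0:Nat)+1 : Nat) : Int) = 1 by norm_num,
        PySem.List.pyRange_one_eq_nil (by omega : (1:Int) ≤ 1)]
      cases xs with
      | nil => simp at hn
      | cons x t => simp [pvRuns]
    · have hn' : n ≤ xs.length := by omega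
      have hnlt : n < xs.length := by omega
      rw [show (((n:Nat)+1 : Nat) : Int) = (n : Int) + 1 by push_cast; ring,
        PySem.List.pyRange_one_succ_right (by exact_mod_cast Nat.one_le_iff_ne_zero.mpr h0),
        List.foldl_append, ih hn']
      simp only [List.foldl_cons, List.foldl_nil]
      have hL : (pvRuns 0 (xs.take n)).length = n := by
        rw [pvRuns_length, List.length_take]; omega
      have hD : xs.drop n = xs[n] :: xs.drop (n+1) := List.drop_eq_getElem_cons hnlt
      rw [hD]
      have hg1 : PySem.List.pyGetD (pvRuns 0 (xs.take n) ++ xs[n] :: xs.drop (n+1)) ((n : Nat) : Int) 0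
          = xs[n] := by
        rw [PySem.List.pyGetD_natCast]
        have h4 := pvGetD_append_self (pvRuns 0 (xs.take n)) (xs[n] :: xs.drop (n+1)) 0
        rw [hL] at h4
        simpa [List.getElem?_eq_getElem hnlt] using h4
      have hm1 : ((n : Nat) : Int) - 1 = (((n - 1 : Nat)) : Int) := by omega
      have htn : xs.take n ≠ [] := by
        intro hemp
        have := congrArg List.length hemp
        rw [List.length_take] at this
        simp only [List.length_nil] at this
        omega
      have hg2 : PySem.List.pyGetD (pvRuns 0 (xs.take n) ++ xs[n] :: xs.drop (n+1)) (((n : Nat) : Int) - 1) 0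
          = (xs.take n).sum := by
        rw [hm1, PySem.List.pyGetD_natCast,
          pvGetD_append_left _ _ _ (by rw [pvRuns_length, List.length_take]; omega)]
        have h5 := pvRuns_getD_last 0 (xs.take n) htn
        rw [List.length_take, Nat.min_eq_left hn'] at h5
        simpa using h5
      rw [hg1, hg2, PySem.List.pySetD_natCast]
      have hset := pvSet_append_self (pvRuns 0 (xs.take n)) (xs[n] :: xs.drop (n+1))
        (xs[n] + (xs.take n).sum)
      rw [hL] at hset
      rw [hset]
      have htake : xs.take (n+1) = xs.take n ++ [xs[n]] := by
        rw [List.take_add_one, List.getElem?_eq_getElem hnlt]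
        rfl
      rw [htake, pvRuns_snoc]
      have : xs[n] + (xs.take n).sum = 0 + (xs.take n).sum + xs[n] := by ring
      rw [List.set_cons_zero, this, List.append_assoc, List.singleton_append]

-- the ceilings A takes the max of, streamed
def pvCeils : Int → Int → List Int → List Int
  | _, _, [] => []
  | c, i, x :: t =>
      (PySem.Int.floordiv (c + x) (i + 1) + (if PySem.Int.mod (c + x) (i + 1) ≠ 0 then 1 else 0))
        :: pvCeils (c + x) (i + 1) t

theorem pvEnumMap (xs : List Int) (c i : Int) :
    (PySem.List.enumerate (pvRuns c xs) i).map
      (fun ix => PySem.Int.floordiv ix.2 (ix.1+1) + (if PySem.Int.mod ix.2 (ix.1+1) ≠ 0 then 1 else 0))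
    = pvCeils c i xs := by
  induction xs generalizing c i with
  | nil => simp [pvRuns, pvCeils]
  | cons x t ih =>
    simp only [pvRuns, pvCeils, PySem.List.enumerate_cons, List.map_cons]
    rw [ih]

theorem pvCeil_eq (x d : Int) (hd : 0 < d) :
    -(PySem.Int.floordiv (-x) d)
      = PySem.Int.floordiv x d + (if PySem.Int.mod x d ≠ 0 then 1 else 0) := by
  rw [PySem.Int.neg_floordiv_neg_eq_iff_of_pos hd,
    PySem.Int.floordiv_eq_ediv_of_pos hd, PySem.Int.mod_eq_emod_of_pos hd]
  have h1 := Int.ediv_add_emod x d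
  have h2 := Int.emod_nonneg x (by omega : d ≠ 0)
  have h3 := Int.emod_lt_of_pos x hd
  split_ifs with h
  · have hm : 0 < x % d := lt_of_le_of_ne h2 (Ne.symm h)
    constructor <;> nlinarith
  · have hm : x % d = 0 := not_ne_iff.mp h
    constructor <;> nlinarith

-- ceiling bracket: ceil(a/d) ≤ r ↔ a ≤ r*d
theorem pvCeilLe (a d r : Int) (hd : 0 < d) :
    (PySem.Int.floordiv a d + (if PySem.Int.mod a d ≠ 0 then 1 else 0) ≤ r) ↔ a ≤ r * d := by
  rw [← pvCeil_eq a d hd, PySem.Int.floordiv_eq_ediv_of_pos hd]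
  have h1 := Int.ediv_add_emod (-a) d
  have h2 := Int.emod_nonneg (-a) (by omega : d ≠ 0)
  have h3 := Int.emod_lt_of_pos (-a) hd
  constructor <;> intro h <;> nlinarith

-- B's feasibility check says all ceilings are ≤ r
theorem pvFeas_iff (xs : List Int) (c i r : Int) (hi : 0 ≤ i) :
    (pvFeas xs r c (i + 1) = true) ↔ ∀ y ∈ pvCeils c i xs, y ≤ r := by
  induction xs generalizing c i with
  | nil => simp [pvFeas, pvCeils]
  | cons x t ih =>
    simp only [pvFeas, pvCeils, List.mem_cons]
    by_cases h : c + x > r * (i + 1)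
    · rw [if_pos h]
      constructor
      · intro hf; exact absurd hf (by simp)
      · intro hall
        have := (pvCeilLe (c + x) (i + 1) r (by omega)).mp (hall _ (Or.inl rfl))
        omega
    · rw [if_neg h]
      have hhead : PySem.Int.floordiv (c + x) (i + 1) +
          (if PySem.Int.mod (c + x) (i + 1) ≠ 0 then 1 else 0) ≤ r :=
        (pvCeilLe (c + x) (i + 1) r (by omega)).mpr (by omega)
      rw [ih (c + x) (i + 1) (by omega)]
      constructor
      · intro hf y hy
        rcases hy with rfl | hy
        · exact hhead
        · exact hf y hy
      · intro hall y hy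
        exact hall y (Or.inr hy)

-- every ceiling is at most any R ≥ max(0, c + sum) when the entries are nonnegative
theorem pvCeils_le (xs : List Int) (c i R : Int) (hx : ∀ x ∈ xs, 0 ≤ x) (hi : 0 ≤ i)
    (hR : 0 ≤ R) (hs : c + xs.sum ≤ R) : ∀ y ∈ pvCeils c i xs, y ≤ R := by
  induction xs generalizing c i with
  | nil => simp [pvCeils]
  | cons x t ih =>
    intro y hy
    have htsum : 0 ≤ t.sum := List.sum_nonneg (fun z hz => hx z (List.mem_cons_of_mem _ hz))
    simp only [pvCeils, List.mem_cons] at hy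
    rcases hy with rfl | hy
    · rw [pvCeilLe _ _ _ (by omega)]
      have : c + x ≤ R := by simp only [List.sum_cons] at hs; omega
      nlinarith
    · exact ih (c + x) (i + 1) (fun z hz => hx z (List.mem_cons_of_mem _ hz)) (by omega)
        (by simp only [List.sum_cons] at hs; omega) y hy

theorem pvFoldlMax_le_iff (l : List Int) (a R : Int) :
    l.foldl max a ≤ R ↔ a ≤ R ∧ ∀ y ∈ l, y ≤ R := by
  induction l generalizing a with
  | nil => simp
  | cons y u ih =>
    simp only [List.foldl_cons, ih, max_le_iff, List.mem_cons]
    constructor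
    · rintro ⟨⟨h1, h2⟩, h3⟩
      exact ⟨h1, fun z hz => hz.elim (fun h => h ▸ h2) (h3 z)⟩
    · rintro ⟨h1, h2⟩
      exact ⟨⟨h1, h2 y (Or.inl rfl)⟩, fun z hz => h2 z (Or.inr hz)⟩

-- the binary search finds max lo rp when feasibility means rp ≤ r
theorem pvBS_eq (lens : List Int) (rp : Int)
    (hfe : ∀ r : Int, (pvFeas lens r 0 1 = true) ↔ rp ≤ r) :
    ∀ (fuel : Nat) (lo hi : Int), (hi - lo).toNat ≤ fuel → lo ≤ hi → rp ≤ hi →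
      pvBS lens fuel lo hi = max lo rp := by
  intro fuel
  induction fuel with
  | zero =>
    intro lo hi h1 h2 h3
    have : lo = hi := by omega
    subst this
    simp only [pvBS]
    omega
  | succ n ih =>
    intro lo hi h1 h2 h3
    by_cases hlh : lo < hi
    · have hmid := PySem.Int.floordiv_two_mid_bounds (le_of_lt hlh)
      have hmid2 : PySem.Int.floordiv (lo + hi) 2 < hi := by
        rw [PySem.Int.floordiv_eq_ediv_of_pos (by norm_num)] at hmid ⊢
        omega
      simp only [pvBS, if_pos hlh]
      cases hf : pvFeas lens (PySem.Int.floordiv (lo + hi) 2) 0 1 with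
      | true =>
        simp only [if_true]
        exact ih lo _ (by omega) hmid.1 ((hfe _).mp hf)
      | false =>
        simp only [Bool.false_eq_true, if_false]
        have hnf : ¬ rp ≤ PySem.Int.floordiv (lo + hi) 2 := fun hc =>
          absurd ((hfe _).mpr hc) (by simp only [hf, Bool.false_eq_true, not_false_eq_true])
        rw [ih _ hi (by omega) (by omega) h3]
        omega
    · have : lo = hi := by omega
      subst this
      simp only [pvBS, if_neg hlh]
      omega

theorem pvCeils_ne_nil (c i : Int) (xs : List Int) (h : xs ≠ []) : pvCeils c i xs ≠ [] := by
  cases xs with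
  | nil => simp at h
  | cons x t => simp [pvCeils]

-- A's (s, f) loop: the first component equals B's filtered sum
theorem pvSFold (r : Int) (xs : List Int) (s0 f0 : Int) :
    ((xs.foldl (fun (sf : Int × Int) x =>
        if x ≤ r then (sf.1, sf.2 + (r - x))
        else (sf.1 + (x - r), sf.2 - (x - r))) (s0, f0)).1)
    = xs.foldl (fun acc x => if x > r then acc + (x - r) else acc) s0 := by
  induction xs generalizing s0 f0 with
  | nil => rfl
  | cons x t ih =>
    simp only [List.foldl_cons]
    by_cases h : x ≤ r
    · rw [if_pos h, if_neg (by omega)]; exact ih _ _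
    · rw [if_neg h, if_pos (by omega)]; exact ih _ _

theorem pvRc_nonneg (tc : List (List Int)) :
    0 ≤ (PySem.List.max? (tc.map (fun l => (l.length : Int))) (fun x => x)).getD 0 := by
  cases tc with
  | nil => simp [PySem.List.max?]
  | cons l t =>
    simp only [List.map_cons, PySem.List.max?_id_cons, Option.getD_some]
    calc (0 : Int) ≤ (l.length : Int) := by positivity
      _ ≤ _ := (PySem.List.le_foldl_max _ _).1

theorem solve_eq (tc tp : List (List Int)) (htp : tp ≠ []) : solve tc tp = solve_alt tc tp := by
  set lens := tp.map (fun l => (l.length : Int)) with hlens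
  have hlen : lens ≠ [] := by simpa [hlens] using htp
  obtain ⟨z, t, hct⟩ : ∃ z t, pvCeils 0 0 lens = z :: t := by
    cases hc : pvCeils 0 0 lens with
    | nil => exact absurd hc (pvCeils_ne_nil 0 0 _ hlen)
    | cons z t => exact ⟨z, t, rfl⟩
  have hx : ∀ x ∈ lens, (0 : Int) ≤ x := by
    intro x hx
    simp only [hlens, List.mem_map] at hx
    obtain ⟨l, _, rfl⟩ := hx
    positivity
  have hsum : 0 ≤ lens.sum := List.sum_nonneg hx
  set rc := (PySem.List.max? (tc.map (fun l => (l.length : Int))) (fun x => x)).getD 0 with hrc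
  have hrc0 : 0 ≤ rc := pvRc_nonneg tc
  set rp := t.foldl max z with hrp
  have hfe : ∀ r : Int, (pvFeas lens r 0 1 = true) ↔ rp ≤ r := by
    intro r
    have h1 := pvFeas_iff lens 0 0 r le_rfl
    rw [show (0:Int) + 1 = 1 by norm_num] at h1
    rw [h1, hct, hrp]
    constructor
    · intro hall
      rw [pvFoldlMax_le_iff]
      exact ⟨hall z (List.mem_cons_self), fun y hy => hall y (List.mem_cons_of_mem _ hy)⟩
    · intro h y hy
      have := (pvFoldlMax_le_iff t z r).mp h
      rcases List.mem_cons.mp hy with rfl | hy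
      · exact this.1
      · exact this.2 y hy
  have hrphi : rp ≤ rc + lens.sum := by
    have hall := pvCeils_le lens 0 0 (rc + lens.sum) hx le_rfl (by omega) (by omega)
    rw [hct] at hall
    rw [hrp, pvFoldlMax_le_iff]
    exact ⟨hall z (List.mem_cons_self), fun y hy => hall y (List.mem_cons_of_mem _ hy)⟩
  have hbs : pvBS lens (rc + lens.sum - rc).toNat rc (rc + lens.sum) = max rc rp :=
    pvBS_eq lens rp hfe _ rc (rc + lens.sum) le_rfl (by omega) hrphi
  simp only [solve, solve_alt]
  have hmut := pvMutFold lens lens.length le_rfl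
  simp only [List.take_length, List.drop_length, List.append_nil] at hmut
  rw [← hlens, ← hrc, hmut, pvEnumMap, hct, PySem.List.max?_id_cons, Option.getD_some, ← hrp,
    hbs, pvSFold]

-- ===== VERDICT (by name: the statement is the Claim_ definition above) =====
theorem solve_spec : Claim_equal_solve := by
  intro tc tp _ hpre
  exact (solve_eq tc tp hpre.2).symm ▸ rfl

theorem solve_raises : Claim_raises_solve := by
  unfold Claim_raises_solve
  constructor
  · intro tc tp _ hr hp
    exact hp.2 hr.2
  · exact ⟨by decide, by decide, by decide⟩

-- self-check consuming the raises verdict: the raise witness lies in the stated region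
theorem solve_raises_witness_ok :
    Raises_solve pvRaiseWitness_solve.1 pvRaiseWitness_solve.2 :=
  solve_raises.2.2.1
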